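-- pv_equiv track=rewrite | github.com/Hulyamr13/hackerrank | Sansa and XOR.py | xor_sum
-- ===== SOURCE A (Python) =====
-- def xor_sum(T, test_cases):
--     # Function to calculate XOR sum for each test case
--
--     results = []
--     for i in range(T):
--         N = test_cases[i][0]
--         ar = test_cases[i][1]
--
--         result = 0
--         count = 0
--         for i in range(N):
--             count += N - 2*i
--             if (count) % 2 == 1:
--                 result = result ^ ar[i]
--
--         results.append(result)
--
--     return results
-- ===== SOURCE B (Python) =====
-- def xor_sum(T, test_cases):
--     # Per test case: the element count (i+1)(N-i) is odd exactly when N is odd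
--     # (and positive) and the index is even, so the answer is the XOR of the
--     # even-index elements of ar[:N]; even or non-positive N gives 0.
--     def case_xor(N, ar):
--         r = 0
--         for j, x in enumerate(ar[:N]):
--             if j % 2 == 0:
--                 r ^= x
--         return r
--     return [case_xor(N, ar) if N > 0 and N % 2 == 1 else 0
--             for N, ar in test_cases[:max(T, 0)]]
-- ===== Notes on version B (the rewrite author's own statement) =====
-- stated objective: simpler
-- what changed: Replaces A's running subarray-count accumulator and per-iteration parity test with the closed-form result (count (i+1)(N-i) is odd iff N is odd and the index is even): B slices the first T test cases and maps each to the XOR of the even-index elements of ar[:N] when N is odd and positive, else 0, using enumerate instead of index arithmetic.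
import Mathlib
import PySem

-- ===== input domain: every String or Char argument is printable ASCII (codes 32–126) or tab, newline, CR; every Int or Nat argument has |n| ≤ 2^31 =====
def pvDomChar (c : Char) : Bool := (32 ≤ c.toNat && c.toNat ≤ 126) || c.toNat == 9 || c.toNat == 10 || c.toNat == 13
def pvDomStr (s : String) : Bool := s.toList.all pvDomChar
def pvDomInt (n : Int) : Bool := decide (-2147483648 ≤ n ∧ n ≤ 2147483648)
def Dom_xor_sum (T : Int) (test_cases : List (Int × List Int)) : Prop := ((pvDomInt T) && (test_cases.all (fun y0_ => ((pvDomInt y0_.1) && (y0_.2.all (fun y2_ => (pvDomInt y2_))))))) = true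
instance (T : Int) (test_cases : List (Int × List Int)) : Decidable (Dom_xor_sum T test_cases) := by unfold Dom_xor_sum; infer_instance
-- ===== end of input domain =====

-- B replaces A's running subarray-count accumulator and parity test by the closed-form
-- parity result ((i+1)(N-i) is odd iff N is odd and i even) over slices: simpler objective.

-- ===== PORT A =====
def xor_sum (T : Int) (test_cases : List (Int × List Int)) : List Int :=
  (PySem.List.pyRange 0 T 1).foldl (fun results i =>
    let N := (PySem.List.pyGetD test_cases i (0, [])).1
    let ar := (PySem.List.pyGetD test_cases i (0, [])).2
    let rc := (PySem.List.pyRange 0 N 1).foldl (fun (s : Int × Int) i =>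
        let count := s.2 + (N - 2 * i)
        if PySem.Int.mod count 2 = 1 then
          (PySem.Int.bxor s.1 (PySem.List.pyGetD ar i 0), count)
        else (s.1, count)) (0, 0)
    results ++ [rc.1]) []

-- ===== PORT B =====
-- B's helper case_xor: XOR over enumerate(ar[:N]) of the elements at even positions.
def pvCaseXor (N : Int) (ar : List Int) : Int :=
  (PySem.List.enumerate (PySem.List.slice ar none (some N)) 0).foldl
    (fun r p => if PySem.Int.mod p.1 2 = 0 then PySem.Int.bxor r p.2 else r) 0

def xor_sum_alt (T : Int) (test_cases : List (Int × List Int)) : List Int :=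
  (PySem.List.slice test_cases none (some (max T 0))).map
    (fun p => if 0 < p.1 ∧ PySem.Int.mod p.1 2 = 1 then pvCaseXor p.1 p.2 else 0)

-- ===== PRECONDITION & SPEC =====
-- Pre_ excludes exactly the inputs where A raises IndexError: T beyond the number of
-- test cases, or an odd positive N whose array is shorter than N (A indexes the even
-- positions 0,2,…,N-1 there).
def Pre_xor_sum (T : Int) (test_cases : List (Int × List Int)) : Prop :=
  T ≤ (test_cases.length : Int) ∧
    ∀ p ∈ test_cases.take T.toNat,
      (0 < p.1 ∧ PySem.Int.mod p.1 2 = 1) → p.1 ≤ (p.2.length : Int)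
instance (T : Int) (test_cases : List (Int × List Int)) : Decidable (Pre_xor_sum T test_cases) := by
  unfold Pre_xor_sum; infer_instance
def pvWitness_xor_sum : Int × (List (Int × List Int)) := (2, [(3, [1, 2, 3]), (4, [1, 2])])

def Spec_xor_sum (T : Int) (test_cases : List (Int × List Int)) (out : List Int) : Prop := out = xor_sum_alt T test_cases
instance (T : Int) (test_cases : List (Int × List Int)) (out : List Int) : Decidable (Spec_xor_sum T test_cases out) := by unfold Spec_xor_sum; infer_instance

-- ===== CLAIM (what is proved, stated in full; the proofs are below) =====
def Claim_equal_xor_sum : Prop := ∀ (T : Int) (test_cases : List (Int × List Int)), Dom_xor_sum T test_cases → Pre_xor_sum T test_cases → Spec_xor_sum T test_cases (xor_sum T test_cases)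

-- ===== LEMMAS AND PROOFS =====

-- the elements at even positions of a list
def pvEvens : List Int → List Int
  | [] => []
  | [x] => [x]
  | x :: _ :: rest => x :: pvEvens rest

lemma pvEvens_cons (x : Int) (rest : List Int) :
    pvEvens (x :: rest) = x :: pvEvens (rest.drop 1) := by
  cases rest <;> simp [pvEvens]

lemma pvEvens_take_odd : ∀ (n : Nat) (ar : List Int), n % 2 = 1 →
    pvEvens (ar.take (n + 1)) = pvEvens (ar.take n) := by
  intro n
  induction n using Nat.strong_induction_on with
  | _ n ih =>
    intro ar hn
    match ar, n with
    | [], _ => simp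
    | [x], n =>
      rw [List.take_of_length_le (by simp), List.take_of_length_le (by simp; omega)]
    | x :: y :: rest, 1 => simp [pvEvens]
    | x :: y :: rest, (m + 2) =>
      simp only [List.take, pvEvens_cons, List.drop]
      congr 1
      exact ih m (by omega) rest (by omega)

lemma pvEvens_take_even : ∀ (n : Nat) (ar : List Int) (h : n < ar.length), n % 2 = 0 →
    pvEvens (ar.take (n + 1)) = pvEvens (ar.take n) ++ [ar[n]] := by
  intro n
  induction n using Nat.strong_induction_on with
  | _ n ih =>
    intro ar h hn
    match ar, n with
    | x :: rest, 0 => simp [pvEvens]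
    | x :: y :: rest, (m + 2) =>
      have hm : m < rest.length := by simpa using h
      simp only [List.take, pvEvens_cons, List.drop]
      rw [ih m (by omega) rest hm (by omega)]
      simp

-- count (n+1)(N-n) is odd iff N is odd and n is even
lemma pvParity (N : Int) (n : Nat) :
    (((n : Int) + 1) * (N - n)) % 2 = 1 ↔ (N % 2 = 1 ∧ (n : Int) % 2 = 0) := by
  rcases Int.emod_two_eq ((n : Int) + 1) with h1 | h1 <;>
    rcases Int.emod_two_eq (N - (n : Int)) with h2 | h2 <;>
      rw [Int.mul_emod, h1, h2] <;> norm_num <;> omega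

-- invariant of A's inner loop: the accumulator is the XOR (folded left) of the
-- even-position elements among the first n, when N is odd; 0 otherwise
lemma pvInner_inv (N : Int) (ar : List Int) (hlen : PySem.Int.mod N 2 = 1 → N ≤ (ar.length : Int)) :
    ∀ (n : Nat), n ≤ N.toNat →
    (List.map (fun k : Nat => (0 : Int) + (k : Int)) (List.range n)).foldl
      (fun (s : Int × Int) i =>
        let count := s.2 + (N - 2 * i)
        if PySem.Int.mod count 2 = 1 then
          (PySem.Int.bxor s.1 (PySem.List.pyGetD ar i 0), count)
        else (s.1, count)) (0, 0)
    = ((if PySem.Int.mod N 2 = 1 then (pvEvens (ar.take n)).foldl PySem.Int.bxor 0 else 0),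
       (n : Int) * (N - n + 1)) := by
  intro n
  induction n with
  | zero => simp [pvEvens]
  | succ n ih =>
    intro hn
    rw [List.range_succ, List.map_append, List.foldl_append, ih (by omega)]
    simp only [List.map_cons, List.map_nil, List.foldl_cons, List.foldl_nil]
    have hc : (n : Int) * (N - n + 1) + (N - 2 * ((0 : Int) + n)) = ((n : Int) + 1) * (N - n) := by ring
    have hmod : ∀ a : Int, PySem.Int.mod a 2 = a % 2 := fun a =>
      PySem.Int.mod_eq_emod_of_pos (by norm_num)
    simp only [hc, hmod]
    have hnN : (n : Int) < N := by omega
    by_cases hN : N % 2 = 1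
    · have hlen' : N ≤ (ar.length : Int) := hlen (by rw [hmod]; exact hN)
      have hnl : n < ar.length := by omega
      by_cases hpar : (n : Int) % 2 = 0
      · rw [if_pos ((pvParity N n).mpr ⟨hN, hpar⟩), if_pos hN, if_pos hN]
        have hget : PySem.List.pyGetD ar ((0 : Int) + (n : Int)) 0 = ar[n] := by
          rw [zero_add, PySem.List.pyGetD_natCast, List.getD_eq_getElem?_getD,
            List.getElem?_eq_getElem hnl, Option.getD_some]
        rw [hget, pvEvens_take_even n ar hnl (by omega), List.foldl_append]
        simp only [List.foldl_cons, List.foldl_nil, Prod.mk.injEq]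
        exact ⟨trivial, by push_cast; ring⟩
      · rw [if_neg (by rw [pvParity]; tauto), if_pos hN, if_pos hN,
          pvEvens_take_odd n ar (by omega)]
        simp only [Prod.mk.injEq]
        exact ⟨trivial, by push_cast; ring⟩
    · rw [if_neg (by rw [pvParity]; tauto), if_neg hN, if_neg hN]
      simp only [Prod.mk.injEq]
      exact ⟨trivial, by push_cast; ring⟩

-- B's enumerate-fold is the left XOR-fold of the even-position elements
-- (of the tail, when the start index is odd)
lemma pvEnumFold : ∀ (l : List Int) (s : Int) (r : Int),
    (PySem.List.enumerate l s).foldl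
      (fun r p => if PySem.Int.mod p.1 2 = 0 then PySem.Int.bxor r p.2 else r) r
    = (pvEvens (if PySem.Int.mod s 2 = 0 then l else l.drop 1)).foldl PySem.Int.bxor r := by
  intro l
  induction l with
  | nil => intro s r; simp [PySem.List.enumerate, pvEvens]
  | cons x rest ih =>
    intro s r
    rw [PySem.List.enumerate_cons, List.foldl_cons, ih]
    have hmod : ∀ a : Int, PySem.Int.mod a 2 = a % 2 := fun a =>
      PySem.Int.mod_eq_emod_of_pos (by norm_num)
    simp only [hmod]
    by_cases hs : s % 2 = 0
    · rw [if_pos hs, if_neg (by omega : ¬ (s + 1) % 2 = 0), if_pos hs,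
        pvEvens_cons, List.foldl_cons]
    · rw [if_neg hs, if_pos (by omega : (s + 1) % 2 = 0), if_neg hs]
      simp

-- per-test-case equality of A's inner loop and B's case_xor
lemma pvCase_eq (N : Int) (ar : List Int)
    (h : (0 < N ∧ PySem.Int.mod N 2 = 1) → N ≤ (ar.length : Int)) :
    ((PySem.List.pyRange 0 N 1).foldl
      (fun (s : Int × Int) i =>
        let count := s.2 + (N - 2 * i)
        if PySem.Int.mod count 2 = 1 then
          (PySem.Int.bxor s.1 (PySem.List.pyGetD ar i 0), count)
        else (s.1, count)) (0, 0)).1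
    = (if 0 < N ∧ PySem.Int.mod N 2 = 1 then pvCaseXor N ar else 0) := by
  by_cases hpos : 0 < N
  · rw [PySem.List.pyRange_one,
      pvInner_inv N ar (fun hm => h ⟨hpos, hm⟩) ((N - 0).toNat) (by omega)]
    by_cases hN : PySem.Int.mod N 2 = 1
    · rw [if_pos hN, if_pos ⟨hpos, hN⟩]
      unfold pvCaseXor
      rw [PySem.List.slice_to ar (by omega : (0:Int) ≤ N), pvEnumFold,
        if_pos (by simp [PySem.Int.mod])]
      rw [show (N - 0).toNat = N.toNat by omega]
    · rw [if_neg hN, if_neg (by tauto)]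
  · have h0 : (N - 0).toNat = 0 := by omega
    rw [PySem.List.pyRange_one, h0]
    simp only [List.range_zero, List.map_nil, List.foldl_nil]
    rw [if_neg (by tauto)]

-- ===== VERDICT (by name: the statement is the Claim_ definition above) =====
theorem xor_sum_spec : Claim_equal_xor_sum := by
  intro T tc _ hPre
  obtain ⟨hT, hall⟩ := hPre
  unfold Spec_xor_sum xor_sum xor_sum_alt
  rw [PySem.List.foldl_append_singleton_eq_map, List.nil_append,
    PySem.List.slice_to tc (by omega : (0:Int) ≤ max T 0), PySem.List.pyRange_one]
  have hmax : (max T 0).toNat = T.toNat := by omega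
  rw [hmax, List.map_map]
  apply List.ext_getElem
  · simp; omega
  · intro k hk1 hk2
    simp only [List.getElem_map, List.getElem_range, Function.comp_apply]
    have hkT : k < T.toNat := by simpa using hk1
    have hkl : k < tc.length := by omega
    have hget : PySem.List.pyGetD tc ((0 : Int) + (k : Nat)) (0, []) = tc[k] := by
      rw [zero_add, PySem.List.pyGetD_natCast, List.getD_eq_getElem?_getD,
        List.getElem?_eq_getElem hkl, Option.getD_some]
    simp only [hget, List.getElem_take]
    exact pvCase_eq tc[k].1 tc[k].2
      (fun hc => hall tc[k] (by rw [List.mem_take_iff_getElem]; exact ⟨k, by omega, rfl⟩) hc)
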